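-- pv_equiv track=rewrite | github.com/Saifa36622/fibo-python | pass_str1.py | reverse_avoidN
-- ===== SOURCE A (Python) =====
-- def reverse_avoidN(x,N):
--     ans = ""
--     y = 0
--     re_ans = ""
--     if x == " " or x == '':
--         return "Error"
--     while y < len(x):
--         if y % N != 0:
--             ans = ans[::-1]
--             ans += x[y]
--             re_ans = ans[::-1]
--         y += 1
--     return re_ans
-- ===== SOURCE B (Python) =====
-- def reverse_avoidN(x, N):
--     # Closed form: A's reverse-then-append loop ends with re_ans equal to the kept
--     # characters (indices not divisible by N) at even positions reversed followed by
--     # the odd positions, or vice versa, depending on the parity of their count.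
--     if x == " " or x == '':
--         return "Error"
--     kept = [x[y] for y in range(len(x)) if y % N != 0]
--     m = len(kept)
--     if m % 2 == 1:
--         return "".join(reversed(kept[0::2])) + "".join(kept[1::2])
--     else:
--         return "".join(reversed(kept[1::2])) + "".join(kept[0::2])
-- ===== Notes on version B (the rewrite author's own statement) =====
-- stated objective: faster
-- what changed: Replaces the reverse-whole-accumulator-per-character loop by a closed form: collect the kept characters once, then build the answer from the even- and odd-position subsequences (one reversed) chosen by the parity of their count.
import Mathlib
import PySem

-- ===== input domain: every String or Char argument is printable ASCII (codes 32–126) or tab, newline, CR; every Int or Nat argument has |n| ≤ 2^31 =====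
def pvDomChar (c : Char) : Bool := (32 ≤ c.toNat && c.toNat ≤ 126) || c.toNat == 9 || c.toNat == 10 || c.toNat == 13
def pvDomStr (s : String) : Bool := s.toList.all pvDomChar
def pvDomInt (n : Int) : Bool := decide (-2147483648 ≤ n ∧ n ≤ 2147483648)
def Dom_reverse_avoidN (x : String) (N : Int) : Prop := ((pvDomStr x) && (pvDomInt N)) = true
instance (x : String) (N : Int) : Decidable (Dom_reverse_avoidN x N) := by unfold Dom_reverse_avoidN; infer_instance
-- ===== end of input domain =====

-- B replaces A's reverse-the-accumulator-every-step loop by a one-pass filter plus a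
-- parity closed form over the kept characters (objective: faster, asymptotic).


-- ===== PORT A =====
-- Strings are handled as List Char (exact; bridged by String.toList / String.ofList).
-- x[y] is ported with PySem.List.pyGetD: y is always in range inside the loop.
def reverse_avoidN (x : String) (N : Int) : String :=
  if x = " " ∨ x = "" then "Error"
  else
    let cs := x.toList
    let st := (PySem.List.pyRange 0 (cs.length : Int) 1).foldl
      (fun (st : List Char × List Char) y =>
        if PySem.Int.mod y N ≠ 0 then
          let ans := st.1.reverse ++ [PySem.List.pyGetD cs y ' ']
          (ans, ans.reverse)
        else st)
      ([], [])
    String.ofList st.2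

-- ===== PORT B =====
-- Hand port of the step-2 slice l[i::2] (PySem.List.slice has no step): every other
-- element starting at the head; kept[1::2] is everyOther (kept.drop 1). Exact.
def everyOther : List Char → List Char
  | [] => []
  | [a] => [a]
  | a :: _ :: rest => a :: everyOther rest

def reverse_avoidN_alt (x : String) (N : Int) : String :=
  if x = " " ∨ x = "" then "Error"
  else
    let cs := x.toList
    let kept := ((PySem.List.pyRange 0 (cs.length : Int) 1).filter
        (fun y => decide (PySem.Int.mod y N ≠ 0))).map
        (fun y => PySem.List.pyGetD cs y ' ')
    if kept.length % 2 = 1 then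
      String.ofList ((everyOther kept).reverse ++ everyOther (kept.drop 1))
    else
      String.ofList ((everyOther (kept.drop 1)).reverse ++ everyOther kept)

-- ===== PRECONDITION & SPEC =====
-- Pre_ excludes only N = 0 with a non-trivial string: there 'y % N' raises
-- ZeroDivisionError in A (and in B as well).
def Pre_reverse_avoidN (x : String) (N : Int) : Prop := N ≠ 0 ∨ x = "" ∨ x = " "
instance (x : String) (N : Int) : Decidable (Pre_reverse_avoidN x N) := by
  unfold Pre_reverse_avoidN; infer_instance
def pvWitness_reverse_avoidN : String × Int := ("hello", 3)

def Spec_reverse_avoidN (x : String) (N : Int) (out : String) : Prop := out = reverse_avoidN_alt x N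
instance (x : String) (N : Int) (out : String) : Decidable (Spec_reverse_avoidN x N out) := by unfold Spec_reverse_avoidN; infer_instance

-- ===== CLAIM (what is proved, stated in full; the proofs are below) =====
def Claim_equal_reverse_avoidN : Prop := ∀ (x : String) (N : Int), Dom_reverse_avoidN x N → Pre_reverse_avoidN x N → Spec_reverse_avoidN x N (reverse_avoidN x N)

-- ===== LEMMAS AND PROOFS =====

theorem everyOther_cons (a : Char) (l : List Char) :
    everyOther (a :: l) = a :: everyOther (l.drop 1) := by
  cases l <;> simp [everyOther]

-- Intermediate description of A's loop via a "deque" fold (swap the two halves, append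
-- at the end); proof-only, used by neither port.
def dstep (uv : List Char × List Char) (c : Char) : List Char × List Char :=
  (uv.2, uv.1 ++ [c])

-- A's loop body on kept characters matches the deque fold through the relation
-- (ans, re_ans) = (rev u ++ v, rev v ++ u).
theorem fold_rel (k : List Char) : ∀ (u v : List Char),
    k.foldl (fun (st : List Char × List Char) c =>
        (st.1.reverse ++ [c], (st.1.reverse ++ [c]).reverse))
      (u.reverse ++ v, v.reverse ++ u)
    = (let uv := k.foldl dstep (u, v); (uv.1.reverse ++ uv.2, uv.2.reverse ++ uv.1)) := by
  induction k with
  | nil => intro u v; simp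
  | cons c k ih =>
    intro u v
    have := ih v (u ++ [c])
    simp only [List.foldl_cons, dstep, List.reverse_append, List.reverse_reverse,
      List.reverse_cons, List.reverse_nil, List.nil_append, List.append_assoc] at this ⊢
    exact this

-- Closed form of the deque fold: the chars at even positions of k end up appended to
-- one half, the odd positions to the other, swapped when |k| is odd.
theorem dfold_closed (k : List Char) : ∀ (u v : List Char),
    k.foldl dstep (u, v) =
      if k.length % 2 = 0 then (u ++ everyOther k, v ++ everyOther (k.drop 1))
      else (v ++ everyOther (k.drop 1), u ++ everyOther k) := by
  induction k with
  | nil => intro u v; simp [everyOther]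
  | cons c k ih =>
    intro u v
    simp only [List.foldl_cons, dstep, ih v (u ++ [c]), List.length_cons,
      everyOther_cons, List.drop_one, List.tail_cons]
    rcases Nat.even_or_odd k.length with h | h
    · have h0 : k.length % 2 = 0 := Nat.even_iff.mp h
      have h1 : (k.length + 1) % 2 = 1 := by omega
      simp [h0, h1]
    · have h0 : k.length % 2 = 1 := Nat.odd_iff.mp h
      have h1 : (k.length + 1) % 2 = 0 := by omega
      simp [h0, h1]

-- ===== VERDICT (by name: the statement is the Claim_ definition above) =====
theorem reverse_avoidN_spec : Claim_equal_reverse_avoidN := by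
  intro x N _ _
  unfold Spec_reverse_avoidN reverse_avoidN reverse_avoidN_alt
  by_cases hx : x = " " ∨ x = ""
  · simp [hx]
  · simp only [hx, if_false]
    set cs := x.toList
    set kept := ((PySem.List.pyRange 0 (cs.length : Int) 1).filter
        (fun y => decide (PySem.Int.mod y N ≠ 0))).map
        (fun y => PySem.List.pyGetD cs y ' ') with hkept
    -- A's fold over the range with an identity else-branch is the fold over kept
    have hA : (PySem.List.pyRange 0 (cs.length : Int) 1).foldl
        (fun (st : List Char × List Char) y =>
          if PySem.Int.mod y N ≠ 0 then
            let ans := st.1.reverse ++ [PySem.List.pyGetD cs y ' ']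
            (ans, ans.reverse)
          else st)
        ([], [])
      = kept.foldl (fun (st : List Char × List Char) c =>
          (st.1.reverse ++ [c], (st.1.reverse ++ [c]).reverse)) ([], []) := by
      rw [hkept, List.foldl_map, List.foldl_filter]
      congr 1
      funext st y
      by_cases h : PySem.Int.mod y N ≠ 0 <;> simp [h]
    rw [hA]
    have := fold_rel kept [] []
    simp only [List.reverse_nil, List.append_nil] at this
    rw [this, dfold_closed kept [] []]
    rcases Nat.even_or_odd kept.length with h | h
    · have h0 : kept.length % 2 = 0 := Nat.even_iff.mp h
      simp [h0]
    · have h0 : kept.length % 2 = 1 := Nat.odd_iff.mp h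
      simp [h0]
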